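-- pv_equiv track=rewrite | github.com/Dagaril/KnightMovement | KnightMovement.py | checkForRepeatLocation
-- ===== SOURCE A (Python) =====
-- def checkForRepeatLocation(x,y,xPos,yPos):
--     prevX=[];prevY=[]; retBool = False
--     for i in range(0,len(xPos)-1):
--         if xPos[i] == x:
--             prevX.append(i)
--     for z in range(0,len(yPos)-1):
--         if yPos[z] == y:
--             prevY.append(z)
--     for j in range(0,len(prevX)):
--         if prevX[j] in prevY:
--             retBool = True
--     return retBool
-- ===== SOURCE B (Python) =====
-- def checkForRepeatLocation(x, y, xPos, yPos):
--     n = min(len(xPos), len(yPos)) - 1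
--     return any(xPos[i] == x and yPos[i] == y for i in range(n))
-- ===== Notes on version B (the rewrite author's own statement) =====
-- stated objective: alternative
-- what changed: Replaces the three passes (collect matching x-indices, collect matching y-indices, then a membership scan over the two index lists) with a single pass over i < min(len(xPos),len(yPos))-1 checking both coordinates at once.
import Mathlib
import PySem

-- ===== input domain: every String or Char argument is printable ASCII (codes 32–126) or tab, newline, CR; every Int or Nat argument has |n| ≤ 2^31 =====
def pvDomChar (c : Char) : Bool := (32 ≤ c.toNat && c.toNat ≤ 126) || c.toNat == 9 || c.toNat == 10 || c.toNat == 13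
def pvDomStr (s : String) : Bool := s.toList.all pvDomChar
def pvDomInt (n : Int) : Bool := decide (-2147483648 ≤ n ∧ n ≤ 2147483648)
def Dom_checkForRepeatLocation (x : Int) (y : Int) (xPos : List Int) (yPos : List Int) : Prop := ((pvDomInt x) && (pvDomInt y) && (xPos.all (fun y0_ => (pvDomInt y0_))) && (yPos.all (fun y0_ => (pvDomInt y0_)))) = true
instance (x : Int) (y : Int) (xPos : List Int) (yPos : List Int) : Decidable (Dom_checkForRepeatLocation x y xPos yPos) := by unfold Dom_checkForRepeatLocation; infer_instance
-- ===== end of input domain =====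

-- B replaces A's three passes (two index-collecting loops plus a membership scan over the
-- collected index lists) with a single pass checking both coordinates at once; objective: alternative.

-- ===== PORT A =====
-- literal transliteration of A: two index-collecting loops, then a membership scan
def checkForRepeatLocation (x : Int) (y : Int) (xPos : List Int) (yPos : List Int) : Bool :=
  let prevX : List Int := (PySem.List.pyRange 0 ((xPos.length : Int) - 1) 1).foldl
    (fun acc i => if PySem.List.pyGetD xPos i 0 = x then acc ++ [i] else acc) []
  let prevY : List Int := (PySem.List.pyRange 0 ((yPos.length : Int) - 1) 1).foldl
    (fun acc z => if PySem.List.pyGetD yPos z 0 = y then acc ++ [z] else acc) []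
  let retBool : Bool := (PySem.List.pyRange 0 ((prevX.length : Int)) 1).foldl
    (fun b j => if prevY.contains (PySem.List.pyGetD prevX j 0) then true else b) false
  retBool

-- ===== PORT B =====
-- literal transliteration of B: any() over one range checking both coordinates
def checkForRepeatLocation_alt (x : Int) (y : Int) (xPos : List Int) (yPos : List Int) : Bool :=
  let n : Int := min (xPos.length : Int) (yPos.length : Int) - 1
  (PySem.List.pyRange 0 n 1).any
    (fun i => (PySem.List.pyGetD xPos i 0 == x) && (PySem.List.pyGetD yPos i 0 == y))

-- ===== PRECONDITION & SPEC =====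
def Spec_checkForRepeatLocation (x : Int) (y : Int) (xPos : List Int) (yPos : List Int) (out : Bool) : Prop := out = checkForRepeatLocation_alt x y xPos yPos
instance (x : Int) (y : Int) (xPos : List Int) (yPos : List Int) (out : Bool) : Decidable (Spec_checkForRepeatLocation x y xPos yPos out) := by unfold Spec_checkForRepeatLocation; infer_instance

-- ===== CLAIM (what is proved, stated in full; the proofs are below) =====
def Claim_equal_checkForRepeatLocation : Prop := ∀ (x : Int) (y : Int) (xPos : List Int) (yPos : List Int), Dom_checkForRepeatLocation x y xPos yPos → Spec_checkForRepeatLocation x y xPos yPos (checkForRepeatLocation x y xPos yPos)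

-- ===== LEMMAS AND PROOFS =====

-- A's third loop is a fold that latches 'true'; it computes 'any membership'.
theorem pv_foldl_latch {α : Type} (p : α → Bool) (l : List α) (b : Bool) :
    l.foldl (fun acc v => if p v then true else acc) b = (b || l.any p) := by
  induction l generalizing b with
  | nil => simp
  | cons a l ih =>
      simp only [List.foldl_cons, List.any_cons]
      by_cases h : p a = true
      · rw [if_pos h, ih]; simp [h]
      · rw [if_neg h, ih]; simp at h; simp [h]

-- A's third loop, as a statement about the collected index lists.
theorem pv_third (prevX prevY : List Int) :
    (PySem.List.pyRange 0 ((prevX.length : Int)) 1).foldl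
      (fun b j => if prevY.contains (PySem.List.pyGetD prevX j 0) then true else b) false
    = prevX.any prevY.contains := by
  have h := PySem.List.foldl_pyRange_zero_pyGetD' prevX (0 : Int)
    (fun b v => if prevY.contains v then true else b) false
  simp only [] at h
  rw [h, pv_foldl_latch]
  simp

theorem pv_eq_on_all (x y : Int) (xPos yPos : List Int) :
    checkForRepeatLocation x y xPos yPos = checkForRepeatLocation_alt x y xPos yPos := by
  show ((PySem.List.pyRange 0
      ((((PySem.List.pyRange 0 ((xPos.length : Int) - 1) 1).foldl
          (fun acc i => if PySem.List.pyGetD xPos i 0 = x then acc ++ [i] else acc) []).length : Int)) 1).foldl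
      (fun b j => if ((PySem.List.pyRange 0 ((yPos.length : Int) - 1) 1).foldl
          (fun acc z => if PySem.List.pyGetD yPos z 0 = y then acc ++ [z] else acc) []).contains
            (PySem.List.pyGetD ((PySem.List.pyRange 0 ((xPos.length : Int) - 1) 1).foldl
              (fun acc i => if PySem.List.pyGetD xPos i 0 = x then acc ++ [i] else acc) []) j 0)
         then true else b) false)
    = (PySem.List.pyRange 0 (min (xPos.length : Int) (yPos.length : Int) - 1) 1).any
        (fun i => (PySem.List.pyGetD xPos i 0 == x) && (PySem.List.pyGetD yPos i 0 == y))
  rw [PySem.List.foldl_append_ite_eq_filter, PySem.List.foldl_append_ite_eq_filter]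
  rw [List.nil_append, List.nil_append]
  rw [pv_third]
  rw [Bool.eq_iff_iff]
  simp only [List.any_eq_true, List.mem_filter, PySem.List.mem_pyRange_one,
    List.contains_eq_mem, List.mem_filter, decide_eq_true_eq, Bool.and_eq_true, beq_iff_eq]
  constructor
  · rintro ⟨i, ⟨⟨hi0, hix⟩, hx⟩, ⟨⟨_, hiy⟩, hy⟩⟩
    exact ⟨i, ⟨hi0, by omega⟩, hx, hy⟩
  · rintro ⟨i, ⟨hi0, hin⟩, hx, hy⟩
    exact ⟨i, ⟨⟨hi0, by omega⟩, hx⟩, ⟨⟨hi0, by omega⟩, hy⟩⟩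

-- ===== VERDICT (by name: the statement is the Claim_ definition above) =====
theorem checkForRepeatLocation_spec : Claim_equal_checkForRepeatLocation := by
  intro x y xPos yPos _
  exact pv_eq_on_all x y xPos yPos
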